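-- pv_equiv track=rewrite | github.com/J1-MI/OMT_Third_Project_Scanner | port_scanner/port_scanner.py | expand_ports
-- ===== SOURCE A (Python) =====
-- from typing import List, Tuple, Dict, Optional
--
-- def expand_ports(port_spec: str) -> List[int]:
--     ports = set()
--     for part in port_spec.split(','):
--         part = part.strip()
--         if not part:
--             continue
--         if '-' in part:
--             a, b = part.split('-', 1)
--             ports.update(range(int(a), int(b) + 1))
--         else:
--             ports.add(int(part))
--     return sorted(p for p in ports if 0 < p <= 65535)
-- ===== SOURCE B (Python) =====
-- def expand_ports(port_spec: str):
--     # Parse each part into a clamped interval, sort intervals, then sweep once,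
--     # merging overlaps and emitting each maximal run directly in order.
--     intervals = []
--     for part in port_spec.split(','):
--         part = part.strip()
--         if not part:
--             continue
--         if '-' in part:
--             a, b = part.split('-', 1)
--             lo, hi = int(a), int(b)
--         else:
--             lo = hi = int(part)
--         lo = max(lo, 1)
--         hi = min(hi, 65535)
--         if lo <= hi:
--             intervals.append((lo, hi))
--     intervals.sort(key=lambda t: t[0])
--     result = []
--     if intervals:
--         lo, hi = intervals[0]
--         for l, h in intervals[1:]:
--             if l <= hi:
--                 if h > hi:
--                     hi = h
--             else:
--                 result.extend(range(lo, hi + 1))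
--                 lo, hi = l, h
--         result.extend(range(lo, hi + 1))
--     return result
-- ===== Notes on version B (the rewrite author's own statement) =====
-- stated objective: alternative
-- what changed: B works in interval arithmetic instead of per-port enumeration: each part becomes one clamped (lo,hi) interval, the few intervals are sorted by lo and swept once, merging overlaps and emitting each maximal run directly in increasing order, replacing A's per-port hash set, membership filter and sorted() over the expanded ports.
import Mathlib
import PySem

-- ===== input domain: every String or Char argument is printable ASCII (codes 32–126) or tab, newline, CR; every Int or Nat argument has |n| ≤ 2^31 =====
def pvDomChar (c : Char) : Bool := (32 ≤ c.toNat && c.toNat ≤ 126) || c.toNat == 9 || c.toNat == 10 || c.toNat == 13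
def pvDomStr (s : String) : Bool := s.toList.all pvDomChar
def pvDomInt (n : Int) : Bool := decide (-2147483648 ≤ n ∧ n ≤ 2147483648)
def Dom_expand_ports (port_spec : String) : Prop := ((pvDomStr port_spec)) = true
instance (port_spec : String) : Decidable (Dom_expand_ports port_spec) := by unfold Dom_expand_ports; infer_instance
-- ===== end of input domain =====

-- B replaces A's per-port hash set + sorted() by interval arithmetic: each part becomes one
-- clamped interval, the few intervals are sorted and swept once, merged runs being emitted
-- directly in increasing order (alternative algorithm; return value proved equal).

-- ===== PORT A =====
-- the body of A's 'for part in port_spec.split(',')' loop, named for the proofs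
def pvPartA (ports : PySem.Set Int) (part0 : String) : PySem.Set Int :=
  let part := PySem.Str.strip part0
  if part = "" then ports
  else if PySem.Str.isIn "-" part then
    match PySem.Str.splitMax? part "-" 1 with
    | some [a, b] =>
        PySem.Set.update ports
          (PySem.List.pyRange ((PySem.Int.ofStr? a).getD 0)
            (((PySem.Int.ofStr? b).getD 0) + 1) 1)
    | _ => ports   -- unreachable: '-' ∈ part gives exactly two pieces
  else PySem.Set.add ports ((PySem.Int.ofStr? part).getD 0)

def expand_ports (port_spec : String) : List Int :=
  let ports : PySem.Set Int :=
    ((PySem.Str.split? port_spec ",").getD []).foldl pvPartA PySem.Set.empty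
  PySem.List.sorted (ports.filter (fun p => decide (0 < p ∧ p ≤ 65535))) (fun x => x) false

-- ===== PORT B =====
-- the body of B's parsing loop: append the clamped interval of one part (if nonempty)
def pvParseB (acc : List (Int × Int)) (part0 : String) : List (Int × Int) :=
  let part := PySem.Str.strip part0
  if part = "" then acc
  else
    let lohi : Int × Int :=
      if PySem.Str.isIn "-" part then
        match PySem.Str.splitMax? part "-" 1 with
        | some [a, b] => (((PySem.Int.ofStr? a).getD 0), ((PySem.Int.ofStr? b).getD 0))
        | _ => (1, 0)   -- unreachable: '-' ∈ part gives exactly two pieces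
      else
        let v := (PySem.Int.ofStr? part).getD 0
        (v, v)
    let lo := max lohi.1 1
    let hi := min lohi.2 65535
    if lo ≤ hi then acc ++ [(lo, hi)] else acc

-- the body of B's sweep loop: state is (result so far, current run lo, current run hi)
def pvEmitB (st : List Int × Int × Int) (iv : Int × Int) : List Int × Int × Int :=
  if iv.1 ≤ st.2.2 then
    (st.1, st.2.1, if iv.2 > st.2.2 then iv.2 else st.2.2)
  else
    (st.1 ++ PySem.List.pyRange st.2.1 (st.2.2 + 1) 1, iv.1, iv.2)

def expand_ports_alt (port_spec : String) : List Int :=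
  let intervals : List (Int × Int) :=
    ((PySem.Str.split? port_spec ",").getD []).foldl pvParseB []
  match PySem.List.sorted intervals (fun t => t.1) false with
  | [] => []
  | (lo, hi) :: rest =>
      let st := rest.foldl pvEmitB ([], lo, hi)
      st.1 ++ PySem.List.pyRange st.2.1 (st.2.2 + 1) 1

-- ===== PRECONDITION & SPEC =====
-- Pre_ excludes exactly the inputs where Python's int() raises ValueError in A (and identically in B): some comma part, stripped and nonempty, is not an integer literal (for a '-' part: either side of the first '-').
def pvOkPart (part0 : String) : Bool :=
  let part := PySem.Str.strip part0
  if part = "" then true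
  else if PySem.Str.isIn "-" part then
    match PySem.Str.splitMax? part "-" 1 with
    | some [a, b] => (PySem.Int.ofStr? a).isSome && (PySem.Int.ofStr? b).isSome
    | _ => true
  else (PySem.Int.ofStr? part).isSome

def Pre_expand_ports (port_spec : String) : Prop :=
  ∀ part ∈ (PySem.Str.split? port_spec ",").getD [], pvOkPart part = true
instance (port_spec : String) : Decidable (Pre_expand_ports port_spec) := by
  unfold Pre_expand_ports; infer_instance

def pvWitness_expand_ports : String := "80, 8000-8005 ,443,70000,1-3"

def Spec_expand_ports (port_spec : String) (out : List Int) : Prop := out = expand_ports_alt port_spec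
instance (port_spec : String) (out : List Int) : Decidable (Spec_expand_ports port_spec out) := by
  unfold Spec_expand_ports; infer_instance

-- ===== CLAIM (what is proved, stated in full; the proofs are below) =====
def Claim_equal_expand_ports : Prop := ∀ (port_spec : String), Dom_expand_ports port_spec → Pre_expand_ports port_spec → Spec_expand_ports port_spec (expand_ports port_spec)

-- ===== LEMMAS AND PROOFS =====

-- the raw (lo, hi) pair a nonempty stripped part denotes (shared shape of both ports' parsing)
def pvLoHi (part : String) : Int × Int :=
  if PySem.Str.isIn "-" part then
    match PySem.Str.splitMax? part "-" 1 with
    | some [a, b] => (((PySem.Int.ofStr? a).getD 0), ((PySem.Int.ofStr? b).getD 0))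
    | _ => (1, 0)
  else
    let v := (PySem.Int.ofStr? part).getD 0
    (v, v)

-- the ports one part contributes to A's set
def pvPorts (part0 : String) : List Int :=
  if PySem.Str.strip part0 = "" then []
  else
    PySem.List.pyRange (pvLoHi (PySem.Str.strip part0)).1
      ((pvLoHi (PySem.Str.strip part0)).2 + 1) 1

-- the interval one part contributes to B's list (empty or a singleton)
def pvIv (part0 : String) : List (Int × Int) :=
  if PySem.Str.strip part0 = "" then []
  else
    let lo := max (pvLoHi (PySem.Str.strip part0)).1 1
    let hi := min (pvLoHi (PySem.Str.strip part0)).2 65535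
    if lo ≤ hi then [(lo, hi)] else []

def pvCovered (L : List (Int × Int)) (x : Int) : Prop := ∃ p ∈ L, p.1 ≤ x ∧ x ≤ p.2

lemma pvPartA_eq (S : PySem.Set Int) (part0 : String) :
    pvPartA S part0 = PySem.Set.update S (pvPorts part0) := by
  unfold pvPartA pvPorts pvLoHi
  by_cases h1 : PySem.Str.strip part0 = ""
  · rw [if_pos h1, if_pos h1]; rfl
  · rw [if_neg h1, if_neg h1]
    by_cases h2 : PySem.Str.isIn "-" (PySem.Str.strip part0) = true
    · rw [if_pos h2, if_pos h2]
      rcases hsp : PySem.Str.splitMax? (PySem.Str.strip part0) "-" 1 with _ | (_|⟨a, _|⟨b, _|l⟩⟩) <;>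
        dsimp only <;> rfl
    · rw [if_neg h2, if_neg h2]
      dsimp only
      rw [PySem.List.pyRange_one_singleton]
      rfl

lemma pvFoldA_mem (parts : List String) (S : PySem.Set Int) (x : Int) :
    x ∈ parts.foldl pvPartA S ↔ x ∈ S ∨ ∃ part ∈ parts, x ∈ pvPorts part := by
  induction parts generalizing S with
  | nil => simp
  | cons p parts ih =>
      simp only [List.foldl_cons, ih, pvPartA_eq, PySem.Set.mem_update, List.mem_cons]
      constructor
      · rintro ((h | h) | ⟨q, hq, hx⟩)
        · exact Or.inl h
        · exact Or.inr ⟨p, Or.inl rfl, h⟩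
        · exact Or.inr ⟨q, Or.inr hq, hx⟩
      · rintro (h | ⟨q, (rfl | hq), hx⟩)
        · exact Or.inl (Or.inl h)
        · exact Or.inl (Or.inr hx)
        · exact Or.inr ⟨q, hq, hx⟩

lemma pvFoldA_nodup (parts : List String) (S : PySem.Set Int) (h : S.Nodup) :
    (parts.foldl pvPartA S).Nodup := by
  induction parts generalizing S with
  | nil => exact h
  | cons p parts ih =>
      simp only [List.foldl_cons, pvPartA_eq]
      exact ih _ (PySem.Set.nodup_update _ _ h)

lemma pvParseB_eq (acc : List (Int × Int)) (part0 : String) :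
    pvParseB acc part0 = acc ++ pvIv part0 := by
  unfold pvParseB pvIv pvLoHi
  by_cases h1 : PySem.Str.strip part0 = ""
  · rw [if_pos h1, if_pos h1]; simp
  · rw [if_neg h1, if_neg h1]
    dsimp only
    split_ifs <;> simp

lemma pvFoldB_eq (parts : List String) :
    parts.foldl pvParseB [] = parts.flatMap pvIv := by
  have hf : pvParseB = fun acc x => acc ++ pvIv x := by
    funext a b; exact pvParseB_eq a b
  rw [hf, PySem.List.foldl_append_eq_flatMap, List.nil_append]

-- covered by one part's interval ↔ in its port list and in 1..65535
lemma pvIv_covered (part0 : String) (x : Int) :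
    pvCovered (pvIv part0) x ↔ x ∈ pvPorts part0 ∧ 1 ≤ x ∧ x ≤ 65535 := by
  unfold pvCovered pvIv pvPorts
  by_cases h1 : PySem.Str.strip part0 = ""
  · simp [h1]
  · rw [if_neg h1, if_neg h1]
    rcases hab : pvLoHi (PySem.Str.strip part0) with ⟨a, b⟩
    dsimp only
    split_ifs with h2 <;> simp [PySem.List.mem_pyRange_one] <;> omega

-- each interval B builds is within bounds and nonempty
lemma pvIv_bounds (part0 : String) (p : Int × Int) (hp : p ∈ pvIv part0) :
    1 ≤ p.1 ∧ p.1 ≤ p.2 ∧ p.2 ≤ 65535 := by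
  unfold pvIv at hp
  by_cases h1 : PySem.Str.strip part0 = ""
  · rw [if_pos h1] at hp; simp at hp
  · rw [if_neg h1] at hp
    rcases hab : pvLoHi (PySem.Str.strip part0) with ⟨a, b⟩
    rw [hab] at hp
    dsimp only at hp
    split_ifs at hp with h2
    · simp at hp
      subst hp
      refine ⟨le_max_right _ _, h2, min_le_right _ _⟩
    · simp at hp

-- the sweep: output is strictly increasing and covers exactly res ∪ [lo,hi] ∪ rest
lemma pvGo (rest : List (Int × Int)) (res : List Int) (lo hi : Int)
    (hlohi : lo ≤ hi)
    (hrest : ∀ p ∈ rest, lo ≤ p.1 ∧ p.1 ≤ p.2)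
    (hsort : rest.Pairwise (fun a b => a.1 ≤ b.1))
    (hres : res.Pairwise (· < ·))
    (hlt : ∀ y ∈ res, y < lo) :
    (((rest.foldl pvEmitB (res, lo, hi)).1 ++
        PySem.List.pyRange (rest.foldl pvEmitB (res, lo, hi)).2.1
          ((rest.foldl pvEmitB (res, lo, hi)).2.2 + 1) 1).Pairwise (· < ·)) ∧
    (∀ x : Int,
      x ∈ (rest.foldl pvEmitB (res, lo, hi)).1 ++
        PySem.List.pyRange (rest.foldl pvEmitB (res, lo, hi)).2.1
          ((rest.foldl pvEmitB (res, lo, hi)).2.2 + 1) 1 ↔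
      (x ∈ res ∨ (lo ≤ x ∧ x ≤ hi) ∨ pvCovered rest x)) := by
  induction rest generalizing res lo hi with
  | nil =>
      simp only [List.foldl_nil]
      refine ⟨?_, ?_⟩
      · rw [List.pairwise_append]
        refine ⟨hres, PySem.List.pairwise_lt_pyRange_one _ _, ?_⟩
        intro a ha b hb
        rw [PySem.List.mem_pyRange_one] at hb
        have := hlt a ha
        omega
      · intro x
        simp [PySem.List.mem_pyRange_one, pvCovered]
  | cons q rest ih =>
      obtain ⟨hq1, hq2⟩ := hrest q (by simp)
      have hrest' : ∀ p ∈ rest, q.1 ≤ p.1 ∧ p.1 ≤ p.2 := by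
        intro p hp
        exact ⟨List.rel_of_pairwise_cons hsort hp, (hrest p (by simp [hp])).2⟩
      simp only [List.foldl_cons]
      by_cases hle : q.1 ≤ hi
      · have hstep : pvEmitB (res, lo, hi) q = (res, lo, if q.2 > hi then q.2 else hi) := by
          simp [pvEmitB, hle]
        rw [hstep]
        have hnew : lo ≤ (if q.2 > hi then q.2 else hi) := by split_ifs <;> omega
        have h1 := ih res lo (if q.2 > hi then q.2 else hi) hnew
          (fun p hp => ⟨le_trans hq1 (hrest' p hp).1, (hrest' p hp).2⟩)
          (List.Pairwise.of_cons hsort) hres hlt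
        refine ⟨h1.1, fun x => ?_⟩
        rw [h1.2 x]
        simp only [pvCovered, List.mem_cons]
        constructor
        · rintro (h | h | h)
          · exact Or.inl h
          · split_ifs at h with hgt
            · by_cases hxhi : x ≤ hi
              · exact Or.inr (Or.inl ⟨h.1, hxhi⟩)
              · exact Or.inr (Or.inr ⟨q, Or.inl rfl, by omega⟩)
            · exact Or.inr (Or.inl h)
          · obtain ⟨p, hp, hb⟩ := h
            exact Or.inr (Or.inr ⟨p, Or.inr hp, hb⟩)
        · rintro (h | h | ⟨p, (rfl | hp), hb⟩)
          · exact Or.inl h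
          · refine Or.inr (Or.inl ⟨h.1, ?_⟩); split_ifs <;> omega
          · refine Or.inr (Or.inl ⟨by omega, ?_⟩); split_ifs <;> omega
          · exact Or.inr (Or.inr ⟨p, hp, hb⟩)
      · have hstep : pvEmitB (res, lo, hi) q
            = (res ++ PySem.List.pyRange lo (hi + 1) 1, q.1, q.2) := by
          simp [pvEmitB, hle]
        rw [hstep]
        have hres' : (res ++ PySem.List.pyRange lo (hi + 1) 1).Pairwise (· < ·) := by
          rw [List.pairwise_append]
          refine ⟨hres, PySem.List.pairwise_lt_pyRange_one _ _, ?_⟩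
          intro a ha b hb
          rw [PySem.List.mem_pyRange_one] at hb
          have := hlt a ha
          omega
        have hlt' : ∀ y ∈ res ++ PySem.List.pyRange lo (hi + 1) 1, y < q.1 := by
          intro y hy
          rcases List.mem_append.mp hy with hy | hy
          · have := hlt y hy; omega
          · rw [PySem.List.mem_pyRange_one] at hy; omega
        have h1 := ih (res ++ PySem.List.pyRange lo (hi + 1) 1) q.1 q.2 hq2
          hrest' (List.Pairwise.of_cons hsort) hres' hlt'
        refine ⟨h1.1, fun x => ?_⟩
        rw [h1.2 x]
        simp only [pvCovered, List.mem_cons, List.mem_append, PySem.List.mem_pyRange_one]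
        constructor
        · rintro ((h | h) | h | h)
          · exact Or.inl h
          · exact Or.inr (Or.inl (by omega))
          · exact Or.inr (Or.inr ⟨q, Or.inl rfl, h⟩)
          · obtain ⟨p, hp, hb⟩ := h
            exact Or.inr (Or.inr ⟨p, Or.inr hp, hb⟩)
        · rintro (h | h | ⟨p, (rfl | hp), hb⟩)
          · exact Or.inl (Or.inl h)
          · exact Or.inl (Or.inr (by omega))
          · exact Or.inr (Or.inl hb)
          · exact Or.inr (Or.inr ⟨p, hp, hb⟩)

-- B's output is strictly increasing and holds exactly the covered ports
lemma pvAlt_spec (port_spec : String) :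
    (expand_ports_alt port_spec).Pairwise (· < ·) ∧
    (∀ x : Int, x ∈ expand_ports_alt port_spec ↔
      ∃ part ∈ (PySem.Str.split? port_spec ",").getD [],
        x ∈ pvPorts part ∧ 1 ≤ x ∧ x ≤ 65535) := by
  have hcov : ∀ (parts : List String) (x : Int),
      pvCovered (parts.flatMap pvIv) x ↔
        ∃ part ∈ parts, x ∈ pvPorts part ∧ 1 ≤ x ∧ x ≤ 65535 := by
    intro parts x
    unfold pvCovered
    simp only [List.mem_flatMap]
    constructor
    · rintro ⟨p, ⟨part, hpart, hp⟩, hb⟩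
      exact ⟨part, hpart, (pvIv_covered part x).mp ⟨p, hp, hb⟩⟩
    · rintro ⟨part, hpart, h⟩
      obtain ⟨p, hp, hb⟩ := (pvIv_covered part x).mpr h
      exact ⟨p, ⟨part, hpart, hp⟩, hb⟩
  set parts := (PySem.Str.split? port_spec ",").getD [] with hparts
  have halt : expand_ports_alt port_spec =
      match PySem.List.sorted (parts.flatMap pvIv) (fun t => t.1) false with
      | [] => []
      | (lo, hi) :: rest =>
          let st := rest.foldl pvEmitB ([], lo, hi)
          st.1 ++ PySem.List.pyRange st.2.1 (st.2.2 + 1) 1 := by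
    unfold expand_ports_alt
    rw [pvFoldB_eq]
  have hmemS : ∀ p ∈ PySem.List.sorted (parts.flatMap pvIv) (fun t => t.1) false,
      1 ≤ p.1 ∧ p.1 ≤ p.2 ∧ p.2 ≤ 65535 := by
    intro p hp
    rw [PySem.List.mem_sorted] at hp
    obtain ⟨part, _, hpi⟩ := List.mem_flatMap.mp hp
    exact pvIv_bounds part p hpi
  have hcovS : ∀ x : Int,
      pvCovered (PySem.List.sorted (parts.flatMap pvIv) (fun t => t.1) false) x
        ↔ pvCovered (parts.flatMap pvIv) x := by
    intro x
    unfold pvCovered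
    constructor <;> rintro ⟨p, hp, hb⟩
    · exact ⟨p, (PySem.List.mem_sorted _ _ _ _).mp hp, hb⟩
    · exact ⟨p, (PySem.List.mem_sorted _ _ _ _).mpr hp, hb⟩
  have hsort := PySem.List.sorted_pairwise (xs := parts.flatMap pvIv) (key := fun t => t.1)
  rcases hS : PySem.List.sorted (parts.flatMap pvIv) (fun t => t.1) false
    with _ | ⟨⟨lo, hi⟩, rest⟩
  · rw [halt, hS]
    refine ⟨List.Pairwise.nil, fun x => ?_⟩
    simp only [List.not_mem_nil, false_iff]
    intro h
    obtain ⟨p, hp, hb⟩ := (hcov parts x).mpr h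
    have hmem : p ∈ PySem.List.sorted (parts.flatMap pvIv) (fun t => t.1) false :=
      (PySem.List.mem_sorted _ _ _ _).mpr hp
    rw [hS] at hmem
    exact absurd hmem (List.not_mem_nil)
  · rw [halt, hS]
    rw [hS] at hsort hmemS
    obtain ⟨h1, h2, _⟩ := hmemS (lo, hi) (by simp)
    have hg := pvGo rest [] lo hi h2
      (fun p hp => ⟨List.rel_of_pairwise_cons hsort hp, (hmemS p (by simp [hp])).2.1⟩)
      (List.Pairwise.of_cons hsort) List.Pairwise.nil (by simp)
    refine ⟨hg.1, fun x => ?_⟩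
    rw [hg.2 x, ← hcov parts x, ← hcovS x, hS]
    simp only [pvCovered, List.mem_cons, List.not_mem_nil, false_or]
    constructor
    · rintro (h | h)
      · exact ⟨(lo, hi), Or.inl rfl, h⟩
      · obtain ⟨p, hp, hb⟩ := h
        exact ⟨p, Or.inr hp, hb⟩
    · rintro ⟨p, (rfl | hp), hb⟩
      · exact Or.inl hb
      · exact Or.inr ⟨p, hp, hb⟩

-- ===== VERDICT (by name: the statement is the Claim_ definition above) =====
theorem expand_ports_spec : Claim_equal_expand_ports := by
  intro port_spec _ _
  unfold Spec_expand_ports expand_ports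
  obtain ⟨hpair, hmem⟩ := pvAlt_spec port_spec
  have hempty : (PySem.Set.empty : PySem.Set Int) = [] := rfl
  rw [hempty]
  apply PySem.List.sorted_eq_of_perm_of_pairwise_lt
  · rw [List.perm_ext_iff_of_nodup (hpair.imp ne_of_lt)
      ((pvFoldA_nodup _ _ List.nodup_nil).filter _)]
    intro x
    rw [hmem x, List.mem_filter]
    simp only [pvFoldA_mem, decide_eq_true_eq]
    constructor
    · rintro ⟨part, hpart, hx, hx1, hx2⟩
      exact ⟨Or.inr ⟨part, hpart, hx⟩, by omega⟩
    · rintro ⟨h | ⟨part, hpart, hx⟩, hb⟩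
      · exact absurd h (List.not_mem_nil)
      · exact ⟨part, hpart, hx, by omega, hb.2⟩
  · exact hpair
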